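-- pv_equiv track=rewrite | github.com/ArramBhaskar98/LeetCode | OA/Amazon/19042022_MinHealth.py | minHealth
-- ===== SOURCE A (Python) =====
-- def minHealth(power, armor):
--     """ The main aim of the problem is to return the minimum starting health for a player to win the game.
--      The player health must be greater than 0 at all times. The player is allowed to use the armor only once
--      in any round."""
--     ans = 0
--     armr = True
--     for pow in power:
--         if pow > armor and armr == True:
--             ans += pow - armor
--             armr = False
--         else:
--             ans += pow
--     if armr == True:
--         ans -= max(power)
--     return ans + 1
-- ===== SOURCE B (Python) =====
-- def minHealth(power, armor):
--     # Closed form: the single armor use saves exactly min(armor, max(power))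
--     # damage (the best round to shield saves armor if some round exceeds it,
--     # otherwise the whole max round), so no flag or branching is needed.
--     return sum(power) - min(armor, max(power)) + 1
-- ===== Notes on version B (the rewrite author's own statement) =====
-- stated objective: simpler
-- what changed: Replaces A's one-shot flag loop and its case analysis with the branch-free closed form sum(power) - min(armor, max(power)) + 1, justified by the identity that the armor use saves exactly min(armor, max(power)).
import Mathlib
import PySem

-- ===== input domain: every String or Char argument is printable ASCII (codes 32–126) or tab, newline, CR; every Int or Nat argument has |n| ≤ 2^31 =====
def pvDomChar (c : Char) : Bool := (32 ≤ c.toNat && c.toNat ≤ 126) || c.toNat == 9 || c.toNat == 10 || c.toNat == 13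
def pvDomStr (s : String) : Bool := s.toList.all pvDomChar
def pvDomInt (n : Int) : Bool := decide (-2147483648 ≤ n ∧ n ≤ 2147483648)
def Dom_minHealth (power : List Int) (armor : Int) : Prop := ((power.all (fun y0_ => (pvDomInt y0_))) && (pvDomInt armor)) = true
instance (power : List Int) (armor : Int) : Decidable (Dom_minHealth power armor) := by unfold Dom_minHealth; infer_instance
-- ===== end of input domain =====

-- B: branch-free closed form sum(power) - min(armor, max(power)) + 1 instead of A's one-shot flag loop; simpler.
-- ===== PORT A =====
-- Python A: loop accumulating ans with a one-shot armor flag; max([]) raises ValueError on empty power (excluded by Pre_; .getD 0 only fills that excluded case).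
def minHealth (power : List Int) (armor : Int) : Int :=
  let st := power.foldl (fun (st : Int × Bool) pow =>
    if pow > armor ∧ st.2 = true then (st.1 + (pow - armor), false)
    else (st.1 + pow, st.2)) (0, true)
  let ans := if st.2 = true then st.1 - (PySem.List.max? power (fun y => y)).getD 0 else st.1
  ans + 1

-- ===== PORT B =====
-- Python B: sum(power) - min(armor, max(power)) + 1; max([]) raises on empty power (excluded by Pre_; .getD 0 only fills that excluded case).
def minHealth_alt (power : List Int) (armor : Int) : Int :=
  power.foldl (· + ·) 0 - min armor ((PySem.List.max? power (fun y => y)).getD 0) + 1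

-- ===== PRECONDITION & SPEC =====
-- Pre_ excludes only the empty list, on which A raises ValueError (max([])); B raises there too.
def Pre_minHealth (power : List Int) (armor : Int) : Prop := power ≠ []
instance (power : List Int) (armor : Int) : Decidable (Pre_minHealth power armor) := by unfold Pre_minHealth; infer_instance
def pvWitness_minHealth : List Int × Int := ([3, 1, 5], 2)
def Spec_minHealth (power : List Int) (armor : Int) (out : Int) : Prop := out = minHealth_alt power armor
instance (power : List Int) (armor : Int) (out : Int) : Decidable (Spec_minHealth power armor out) := by unfold Spec_minHealth; infer_instance

-- ===== CLAIM (what is proved, stated in full; the proofs are below) =====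
def Claim_equal_minHealth : Prop := ∀ (power : List Int) (armor : Int), Dom_minHealth power armor → Pre_minHealth power armor → Spec_minHealth power armor (minHealth power armor)

-- ===== LEMMAS AND PROOFS =====
-- once the armor flag is consumed, A's loop just adds the remaining elements
theorem mh_sumFalse (armor : Int) (t : List Int) : ∀ (b : Int),
    t.foldl (fun (st : Int × Bool) pow =>
      if pow > armor ∧ st.2 = true then (st.1 + (pow - armor), false)
      else (st.1 + pow, st.2)) (b, false) = (b + t.foldl (· + ·) 0, false) := by
  induction t with
  | nil => simp
  | cons y s ihs =>
    intro b
    simp only [List.foldl_cons]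
    simp at ihs ⊢
    rw [ihs]
    simp only [Prod.mk.injEq]
    refine ⟨?_, trivial⟩
    simp only [PySem.List.foldl_add (g := fun x : Int => x)]
    simp; ring

-- loop characterisation: A's fold ends with accumulator = sum (minus armor iff some element exceeds armor), flag = whether none exceeded
theorem mh_fold (armor : Int) (power : List Int) : ∀ (a : Int),
    power.foldl (fun (st : Int × Bool) pow =>
      if pow > armor ∧ st.2 = true then (st.1 + (pow - armor), false)
      else (st.1 + pow, st.2)) (a, true)
    = (if power.any (fun p => decide (p > armor)) then (a + power.foldl (· + ·) 0 - armor, false)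
       else (a + power.foldl (· + ·) 0, true)) := by
  induction power with
  | nil => simp
  | cons x t ih =>
    intro a
    by_cases hx : x > armor
    · have hp := mh_sumFalse armor t
      simp only [List.foldl_cons]
      simp [hx] at hp ⊢
      rw [hp]
      simp only [Prod.mk.injEq]
      refine ⟨?_, trivial⟩
      simp only [PySem.List.foldl_add (g := fun x : Int => x)]
      simp; ring
    · simp only [List.foldl_cons]
      simp [hx] at ih ⊢
      rw [ih]
      split_ifs with ha <;>
        · simp only [Prod.mk.injEq]
          refine ⟨?_, trivial⟩
          simp only [PySem.List.foldl_add (g := fun x : Int => x)]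
          simp; ring

-- ===== VERDICT (by name: the statement is the Claim_ definition above) =====
theorem minHealth_spec : Claim_equal_minHealth := by
  intro power armor _ hne
  unfold Spec_minHealth minHealth minHealth_alt
  obtain ⟨m, hm⟩ : ∃ m, PySem.List.max? power (fun y => y) = some m := by
    obtain ⟨x, t, rfl⟩ := List.exists_cons_of_ne_nil hne
    exact ⟨t.foldl max x, PySem.List.max?_id_cons x t⟩
  have hmem := PySem.List.max?_mem hm
  have hmax := PySem.List.max?_isMax hm
  rw [mh_fold]
  by_cases h : power.any (fun p => decide (p > armor))
  · -- some element exceeds armor, hence armor < m, so min armor m = armor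
    obtain ⟨p, hp, hpa⟩ := List.any_eq_true.mp h
    have : armor < m := lt_of_lt_of_le (by simpa using hpa) (hmax p hp)
    simp [h, hm, min_eq_left (le_of_lt this)]
  · -- no element exceeds armor, hence m ≤ armor, so min armor m = m
    have hall : ∀ p ∈ power, p ≤ armor := by
      intro p hp
      by_contra hc
      exact h (List.any_eq_true.mpr ⟨p, hp, by simpa using lt_of_not_ge hc⟩)
    simp [h, hm, min_eq_right (hall m hmem)]
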